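-- pv_equiv track=rewrite | github.com/mzabolocki/bycycle | bycycle/burst.py | _min_consecutive_cycles
-- ===== SOURCE A (Python) =====
-- def _min_consecutive_cycles(is_burst, min_n_cycles=3):
--     """Enforce minimum number of consecutive cycles."""
--
--     temp_cycle_count = 0
--
--     for idx, bursting in enumerate(is_burst):
--
--         if bursting:
--             temp_cycle_count += 1
--
--         else:
--
--             if temp_cycle_count < min_n_cycles:
--                 for c_rm in range(temp_cycle_count):
--                     is_burst[idx - 1 - c_rm] = False
--
--             temp_cycle_count = 0
--
--     return is_burst
-- ===== SOURCE B (Python) =====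
-- def _min_consecutive_cycles(is_burst, min_n_cycles=3):
--     """Enforce minimum number of consecutive cycles (run-based scan, in-place)."""
--     n = len(is_burst)
--     i = 0
--     while i < n:
--         j = i
--         while j < n and is_burst[j] == is_burst[i]:
--             j += 1
--         # a True run is blanked only if it is short AND terminated by a False
--         if is_burst[i] and j < n and j - i < min_n_cycles:
--             is_burst[i:j] = [False] * (j - i)
--         i = j
--     return is_burst
-- ===== Notes on version B (the rewrite author's own statement) =====
-- stated objective: simpler
-- what changed: A counts consecutive True cycles and, on each terminating False, walks backwards blanking the short run one index at a time; B scans maximal runs of equal values with a two-pointer boundary scan and blanks a short terminated True run with a single slice assignment, with no counter state to reset.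
import Mathlib
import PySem

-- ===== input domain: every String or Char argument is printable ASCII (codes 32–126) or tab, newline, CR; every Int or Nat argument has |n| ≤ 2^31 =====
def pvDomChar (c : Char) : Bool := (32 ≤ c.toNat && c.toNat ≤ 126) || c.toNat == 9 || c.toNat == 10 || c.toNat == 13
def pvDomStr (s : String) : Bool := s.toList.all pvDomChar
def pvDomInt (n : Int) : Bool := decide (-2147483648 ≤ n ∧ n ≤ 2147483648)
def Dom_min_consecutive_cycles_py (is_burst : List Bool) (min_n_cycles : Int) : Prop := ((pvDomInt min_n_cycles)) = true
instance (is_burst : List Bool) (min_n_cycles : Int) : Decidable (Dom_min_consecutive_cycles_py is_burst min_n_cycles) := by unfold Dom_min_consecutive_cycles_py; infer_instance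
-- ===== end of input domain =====

-- ===== PORT A =====
-- B rewrites A's counter-and-backtrack scan as a run-boundary scan with slice blanking (objective: simpler).
-- Both A and B mutate is_burst in place in Python; the equivalence proved here is about the return value
-- (which is the same object). Python's `for idx, bursting in enumerate(is_burst)` reads index idx before any
-- mutation at that index (A only writes indices < idx), so enumerating the original list is exact.
def min_consecutive_cycles_py (is_burst : List Bool) (min_n_cycles : Int) : List Bool :=
  -- state st = (is_burst, temp_cycle_count); p = (idx, bursting)
  ((PySem.List.enumerate is_burst 0).foldl
    (fun (st : List Bool × Int) (p : Int × Bool) =>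
      if p.2 then (st.1, st.2 + 1)
      else
        ((if st.2 < min_n_cycles then
            -- for c_rm in range(temp_cycle_count): is_burst[idx - 1 - c_rm] = False
            -- (the index is always in range here, so the total pySetD is exact)
            (PySem.List.pyRange 0 st.2 1).foldl
              (fun l c => PySem.List.pySetD l (p.1 - 1 - c) false) st.1
          else st.1), 0))
    (is_burst, 0)).1

-- ===== PORT B =====
-- Source B's outer while-loop over maximal runs of equal values: each step consumes one whole run
-- (head plus takeWhile/dropWhile = the inner `while j < n and is_burst[j] == is_burst[i]` scan),
-- blanks a True run only if it is short and terminated by a following element.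
def altGo (m : Int) : List Bool → List Bool
  | [] => []
  | b :: rest =>
    let run := rest.takeWhile (· == b)
    let rest' := rest.dropWhile (· == b)
    (if b && !rest'.isEmpty && decide (((run.length : Int) + 1) < m)
     then List.replicate (run.length + 1) false
     else b :: run) ++ altGo m rest'
termination_by l => l.length
decreasing_by
  simp only [List.length_cons]
  exact Nat.lt_succ_of_le (List.length_dropWhile_le _ _)

def min_consecutive_cycles_py_alt (is_burst : List Bool) (min_n_cycles : Int) : List Bool :=
  altGo min_n_cycles is_burst

-- ===== PRECONDITION & SPEC =====
def Spec_min_consecutive_cycles_py (is_burst : List Bool) (min_n_cycles : Int) (out : List Bool) : Prop := out = min_consecutive_cycles_py_alt is_burst min_n_cycles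
instance (is_burst : List Bool) (min_n_cycles : Int) (out : List Bool) : Decidable (Spec_min_consecutive_cycles_py is_burst min_n_cycles out) := by unfold Spec_min_consecutive_cycles_py; infer_instance

-- ===== CLAIM (what is proved, stated in full; the proofs are below) =====
def Claim_equal_min_consecutive_cycles_py : Prop := ∀ (is_burst : List Bool) (min_n_cycles : Int), Dom_min_consecutive_cycles_py is_burst min_n_cycles → Spec_min_consecutive_cycles_py is_burst min_n_cycles (min_consecutive_cycles_py is_burst min_n_cycles)

-- ===== LEMMAS AND PROOFS =====

-- The inner `for c_rm in range(cnt)` fold blanks exactly the run X (of length n) sitting at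
-- positions idx-n .. idx-1, i.e. between `out` and `rest`.
theorem clear_fold : ∀ (n : ℕ) (idx : Int) (out X rest : List Bool), X.length = n →
    idx = (out.length : Int) + n →
    (PySem.List.pyRange 0 (n : Int) 1).foldl
      (fun l c => PySem.List.pySetD l (idx - 1 - c) false) (out ++ (X ++ rest))
    = out ++ (List.replicate n false ++ rest) := by
  intro n
  induction n with
  | zero =>
    intro idx out X rest hX hidx
    rw [List.length_eq_zero_iff] at hX
    subst hX
    simp [PySem.List.pyRange_one_eq_nil]
  | succ n ih =>
    intro idx out X rest hX hidx
    match X, hX with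
    | x :: X', hX =>
      have hX' : X'.length = n := by simpa using hX
      have hcast : ((n + 1 : ℕ) : Int) = (n : Int) + 1 := by push_cast; ring
      rw [hcast, PySem.List.pyRange_one_succ_right (by positivity), List.foldl_append]
      have hmid : out ++ (x :: X' ++ rest) = (out ++ [x]) ++ (X' ++ rest) := by simp
      rw [hmid, ih idx (out ++ [x]) X' rest hX' (by simp [hidx]; ring)]
      simp only [List.foldl_cons, List.foldl_nil]
      have hidx2 : idx - 1 - (n : Int) = ((out.length : ℕ) : Int) := by omega
      rw [hidx2, PySem.List.pySetD_natCast]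
      rw [List.append_assoc, List.set_append_right _ _ (Nat.le_refl _)]
      simp [List.replicate_succ]

-- altGo passes a leading False through unchanged.
theorem altGo_false_cons (m : Int) (s : List Bool) :
    altGo m (false :: s) = false :: altGo m s := by
  match s with
  | [] => simp [altGo]
  | false :: t => simp [altGo]
  | true :: t => simp [altGo]

-- A trailing all-True run is kept.
theorem altGo_rep_true (m : Int) (c : ℕ) :
    altGo m (List.replicate c true) = List.replicate c true := by
  match c with
  | 0 => simp [altGo]
  | Nat.succ c => simp [altGo, List.replicate_succ]

theorem takeWhile_rep_true_false (c : ℕ) (s : List Bool) :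
    (List.replicate c true ++ false :: s).takeWhile (· == true) = List.replicate c true := by
  induction c with
  | zero => simp
  | succ c ih => simp [List.replicate_succ]

theorem dropWhile_rep_true_false (c : ℕ) (s : List Bool) :
    (List.replicate c true ++ false :: s).dropWhile (· == true) = false :: s := by
  induction c with
  | zero => simp
  | succ c ih => simp [List.replicate_succ]

-- How altGo treats a True run terminated by a False.
theorem altGo_run (m : Int) (c : ℕ) (s : List Bool) :
    altGo m (List.replicate c true ++ false :: s)
    = (if (c : Int) < m then List.replicate c false else List.replicate c true)
      ++ false :: altGo m s := by
  match c with
  | 0 => simp [altGo_false_cons]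
  | Nat.succ c =>
    rw [List.replicate_succ, List.cons_append]
    rw [altGo]
    simp only [takeWhile_rep_true_false, dropWhile_rep_true_false, List.length_replicate,
      List.isEmpty_cons, Bool.not_false, Bool.true_and, altGo_false_cons]
    have hcast : ((c : Int) + 1) = ((c + 1 : ℕ) : Int) := by push_cast; ring
    rw [hcast]
    by_cases h : ((c + 1 : ℕ) : Int) < m
    · simp [List.replicate_succ]
    · simp [List.replicate_succ]

-- Main invariant: with `out` already finalised and a pending run of c trues just before the
-- remaining suffix s, A's fold finishes exactly as altGo does on (replicate c true ++ s).
theorem gen (m : Int) : ∀ (s out : List Bool) (c : ℕ),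
    (((PySem.List.enumerate s ((out.length : Int) + c)).foldl
      (fun (st : List Bool × Int) (p : Int × Bool) =>
        if p.2 then (st.1, st.2 + 1)
        else
          ((if st.2 < m then
              (PySem.List.pyRange 0 st.2 1).foldl
                (fun l cc => PySem.List.pySetD l (p.1 - 1 - cc) false) st.1
            else st.1), 0))
      (out ++ (List.replicate c true ++ s), (c : Int))).1)
    = out ++ altGo m (List.replicate c true ++ s) := by
  intro s
  induction s with
  | nil =>
    intro out c
    simp [PySem.List.enumerate, altGo_rep_true]
  | cons b s' ih =>
    intro out c
    rw [PySem.List.enumerate_cons, List.foldl_cons]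
    cases b with
    | true =>
      rw [if_pos rfl]
      have harg : List.replicate c true ++ true :: s' = List.replicate (c + 1) true ++ s' := by
        simp [List.replicate_succ']
      rw [harg]
      have h2 : (out.length : Int) + c + 1 = (out.length : Int) + ((c + 1 : ℕ) : Int) := by
        push_cast; ring
      have h3 : ((c : Int) + 1) = ((c + 1 : ℕ) : Int) := by push_cast; ring
      rw [h2, h3, ih out (c + 1)]
    | false =>
      rw [if_neg Bool.false_ne_true]
      by_cases h : (c : Int) < m
      · rw [if_pos h, clear_fold c ((out.length : Int) + c) out (List.replicate c true)
          (false :: s') (by simp) rfl]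
        have hrec := ih (out ++ List.replicate c false ++ [false]) 0
        simp only [Nat.cast_zero, List.replicate_zero, List.nil_append] at hrec
        have h1 : out ++ (List.replicate c false ++ false :: s')
            = (out ++ List.replicate c false ++ [false]) ++ s' := by simp
        have h2 : (out.length : Int) + c + 1
            = (((out ++ List.replicate c false ++ [false]).length : ℕ) : Int) := by
          simp; ring
        rw [h1, h2, altGo_run, if_pos h]
        simpa using hrec
      · rw [if_neg h]
        have hrec := ih (out ++ List.replicate c true ++ [false]) 0
        simp only [Nat.cast_zero, List.replicate_zero, List.nil_append] at hrec
        have h1 : out ++ (List.replicate c true ++ false :: s')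
            = (out ++ List.replicate c true ++ [false]) ++ s' := by simp
        have h2 : (out.length : Int) + c + 1
            = (((out ++ List.replicate c true ++ [false]).length : ℕ) : Int) := by
          simp; ring
        rw [h1, h2, altGo_run, if_neg h]
        simpa using hrec

-- ===== VERDICT (by name: the statement is the Claim_ definition above) =====
theorem min_consecutive_cycles_py_spec : Claim_equal_min_consecutive_cycles_py := by
  intro is_burst m _
  show min_consecutive_cycles_py is_burst m = min_consecutive_cycles_py_alt is_burst m
  have h := gen m is_burst [] 0
  simpa [min_consecutive_cycles_py, min_consecutive_cycles_py_alt] using h
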